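-- pv_equiv track=rewrite | github.com/deskiziarecords/TRADE | 3d-app-components/layers/layer1-jax.py | calculate_tau_stay
-- ===== SOURCE A (Python) =====
-- σt = 2  # Distribution phase
--
-- def calculate_tau_stay(phase_series):
--     tau_stay = 0
--     for phase in phase_series:
--         if phase == σt:
--             tau_stay += 1
--         else:
--             tau_stay = 0
--     return tau_stay
-- ===== SOURCE B (Python) =====
-- from itertools import takewhile
--
-- σt = 2  # Distribution phase
--
-- def calculate_tau_stay(phase_series):
--     # Reverse scan: count the trailing run of σt, stopping at the first non-σt.
--     return sum(1 for _ in takewhile(lambda p: p == σt, reversed(phase_series)))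
-- ===== Notes on version B (the rewrite author's own statement) =====
-- stated objective: faster
-- what changed: Replaces the full forward accumulate-with-reset pass by a reverse scan (takewhile over reversed input) that stops at the first non-2, counting the trailing run directly.
import Mathlib
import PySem

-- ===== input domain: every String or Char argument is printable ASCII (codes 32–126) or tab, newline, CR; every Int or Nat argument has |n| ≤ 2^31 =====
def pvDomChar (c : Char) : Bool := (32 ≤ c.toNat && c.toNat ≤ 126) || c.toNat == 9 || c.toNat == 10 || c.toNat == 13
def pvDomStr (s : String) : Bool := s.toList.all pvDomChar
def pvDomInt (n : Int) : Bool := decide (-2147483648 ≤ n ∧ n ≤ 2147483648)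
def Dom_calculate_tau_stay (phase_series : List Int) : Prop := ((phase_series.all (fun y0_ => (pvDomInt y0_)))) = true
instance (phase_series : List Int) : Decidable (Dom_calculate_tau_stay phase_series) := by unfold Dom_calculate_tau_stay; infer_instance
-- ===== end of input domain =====

-- B replaces A's forward accumulate-with-reset pass by a reverse scan that counts
-- the trailing run of 2s and stops at the first non-2 (objective: alternative).

-- ===== PORT A =====
def calculate_tau_stay (phase_series : List Int) : Int :=
  phase_series.foldl (fun tau_stay phase => if phase == 2 then tau_stay + 1 else 0) 0

-- ===== PORT B =====
def calculate_tau_stay_alt (phase_series : List Int) : Int :=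
  ((phase_series.reverse.takeWhile (fun p => p == 2)).length : Int)

-- ===== PRECONDITION & SPEC =====
def Spec_calculate_tau_stay (phase_series : List Int) (out : Int) : Prop := out = calculate_tau_stay_alt phase_series
instance (phase_series : List Int) (out : Int) : Decidable (Spec_calculate_tau_stay phase_series out) := by unfold Spec_calculate_tau_stay; infer_instance

-- ===== CLAIM (what is proved, stated in full; the proofs are below) =====
def Claim_equal_calculate_tau_stay : Prop := ∀ (phase_series : List Int), Dom_calculate_tau_stay phase_series → Spec_calculate_tau_stay phase_series (calculate_tau_stay phase_series)

-- ===== LEMMAS AND PROOFS =====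
theorem tau_stay_eq (xs : List Int) :
    calculate_tau_stay xs = calculate_tau_stay_alt xs := by
  induction xs using List.reverseRecOn with
  | nil => rfl
  | append_singleton ys x ih =>
      simp only [calculate_tau_stay, calculate_tau_stay_alt, List.foldl_append,
        List.foldl_cons, List.foldl_nil, List.reverse_append, List.reverse_cons,
        List.reverse_nil, List.nil_append, List.cons_append, List.takeWhile_cons] at *
      by_cases h : x = 2
      · simp only [h, beq_self_eq_true, if_true, List.length_cons]
        rw [ih]; push_cast; ring
      · simp [h]

-- ===== VERDICT (by name: the statement is the Claim_ definition above) =====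
theorem calculate_tau_stay_spec : Claim_equal_calculate_tau_stay := by
  intro xs _
  exact tau_stay_eq xs
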